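-- pv_equiv track=rewrite | github.com/joshuarebo/legalizeme-v3 | app/api/routes/counsel.py | _extract_reasoning_chain
-- ===== SOURCE A (Python) =====
-- from typing import List, Dict, Optional, Any
--
-- def _extract_reasoning_chain(response_text: str) -> List[str]:
--     """Extract reasoning steps from agent response"""
--     try:
--         reasoning_steps = []
--         lines = response_text.split('\n')
--
--         current_step = ""
--         for line in lines:
--             if any(marker in line.upper() for marker in ["1.", "2.", "3.", "4.", "STEP", "ANALYSIS"]):
--                 if current_step:
--                     reasoning_steps.append(current_step.strip())
--                 current_step = line
--             elif current_step:
--                 current_step += " " + line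
--
--         if current_step:
--             reasoning_steps.append(current_step.strip())
--
--         return reasoning_steps[:4]  # Limit to 4 main steps
--
--     except Exception:
--         return ["Legal analysis completed with comprehensive reasoning"]
-- ===== SOURCE B (Python) =====
-- from typing import List
--
--
-- def _extract_reasoning_chain(response_text: str) -> List[str]:
--     """Extract reasoning steps from agent response (index/slice decomposition)."""
--     try:
--         markers = ["1.", "2.", "3.", "4.", "STEP", "ANALYSIS"]
--         lines = response_text.split('\n')
--         idxs = [i for i, line in enumerate(lines)
--                 if any(m in line.upper() for m in markers)]
--         steps = [' '.join(lines[i:j]).strip()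
--                  for i, j in zip(idxs, idxs[1:] + [len(lines)])]
--         return steps[:4]
--     except Exception:
--         return ["Legal analysis completed with comprehensive reasoning"]
-- ===== Notes on version B (the rewrite author's own statement) =====
-- stated objective: alternative
-- what changed: Replaces A's single accumulator loop (carrying current_step across lines) by a two-pass decomposition: first collect the indices of all marker lines, then join-and-strip the slice of lines between each consecutive pair of marker indices.
import Mathlib
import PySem

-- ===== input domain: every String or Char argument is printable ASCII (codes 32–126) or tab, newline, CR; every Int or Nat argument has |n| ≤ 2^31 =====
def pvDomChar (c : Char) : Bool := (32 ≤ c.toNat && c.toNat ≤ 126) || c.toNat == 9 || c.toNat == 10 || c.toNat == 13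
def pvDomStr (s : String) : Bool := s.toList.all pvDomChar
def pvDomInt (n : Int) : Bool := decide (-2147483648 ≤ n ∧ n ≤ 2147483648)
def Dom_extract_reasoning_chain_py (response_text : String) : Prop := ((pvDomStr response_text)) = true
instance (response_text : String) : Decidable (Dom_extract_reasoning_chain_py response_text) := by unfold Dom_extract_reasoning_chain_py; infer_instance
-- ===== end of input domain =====

-- B replaces A's accumulator loop by a two-pass decomposition (collect marker indices, then join the slices
-- between consecutive markers); objective: alternative, same cost, no behavioural change.

-- ===== PORT A =====
def pvMarkers : List (List Char) :=
  [['1','.'], ['2','.'], ['3','.'], ['4','.'], ['S','T','E','P'], ['A','N','A','L','Y','S','I','S']]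

def pvIsMarker (line : List Char) : Bool :=
  pvMarkers.any (fun m => PySem.Chars.isIn m (PySem.Chars.upper line))

-- A's for-loop over the lines, carrying (reasoning_steps, current_step)
def pvLoopA : List (List Char) → List (List Char) → List Char → List (List Char)
  | [], steps, cur => if cur ≠ [] then steps ++ [PySem.Chars.strip cur] else steps
  | l :: ls, steps, cur =>
    if pvIsMarker l then
      pvLoopA ls (if cur ≠ [] then steps ++ [PySem.Chars.strip cur] else steps) l
    else if cur ≠ [] then
      pvLoopA ls steps (cur ++ ' ' :: l)
    else
      pvLoopA ls steps cur

def extract_reasoning_chain_py (response_text : String) : List String :=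
  ((pvLoopA (PySem.Chars.splitOn response_text.toList ['\n']) [] []).take 4).map
    (fun cs => String.ofList cs)

-- ===== PORT B =====
-- first pass: indices of the marker lines
def pvIdxs (lines : List (List Char)) : List Int :=
  ((PySem.List.enumerate lines).filter (fun p => pvIsMarker p.2)).map (fun p => p.1)

-- ' '.join(lines[i:j]).strip()
def pvSeg (lines : List (List Char)) (p : Int × Int) : List Char :=
  PySem.Chars.strip (PySem.Chars.join [' '] (PySem.List.slice lines (some p.1) (some p.2)))

def extract_reasoning_chain_py_alt (response_text : String) : List String :=
  let lines := PySem.Chars.splitOn response_text.toList ['\n']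
  let idxs := pvIdxs lines
  (((idxs.zip (idxs.drop 1 ++ [(lines.length : Int)])).map (pvSeg lines)).take 4).map
    (fun cs => String.ofList cs)

-- ===== PRECONDITION & SPEC =====
def Spec_extract_reasoning_chain_py (response_text : String) (out : List String) : Prop := out = extract_reasoning_chain_py_alt response_text
instance (response_text : String) (out : List String) : Decidable (Spec_extract_reasoning_chain_py response_text out) := by unfold Spec_extract_reasoning_chain_py; infer_instance

-- ===== CLAIM (what is proved, stated in full; the proofs are below) =====
def Claim_equal_extract_reasoning_chain_py : Prop := ∀ (response_text : String), Dom_extract_reasoning_chain_py response_text → Spec_extract_reasoning_chain_py response_text (extract_reasoning_chain_py response_text)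

-- ===== LEMMAS AND PROOFS =====

-- common recursive characterisation both ports are reduced to:
-- pvG cur ls = the group started at marker line cur, then the remaining groups
def pvG : List Char → List (List Char) → List (List Char)
  | cur, [] => [PySem.Chars.strip cur]
  | cur, l :: ls =>
    if pvIsMarker l then PySem.Chars.strip cur :: pvG l ls
    else pvG (cur ++ ' ' :: l) ls

def pvC : List (List Char) → List (List Char)
  | [] => []
  | l :: ls => if pvIsMarker l then pvG l ls else pvC ls

-- Nat-valued marker indices, structurally
def pvNIdxs : List (List Char) → List Nat
  | [] => []
  | l :: ls => if pvIsMarker l then 0 :: (pvNIdxs ls).map (· + 1) else (pvNIdxs ls).map (· + 1)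

lemma pvIsMarker_nil : pvIsMarker [] = false := by decide

lemma pvMarker_ne_nil {l : List Char} (h : pvIsMarker l = true) : l ≠ [] := by
  intro hl; subst hl; simp [pvIsMarker_nil] at h

-- the A-side loop computes pvG once a group is open …
lemma pvLoopA_G : ∀ (ls : List (List Char)) (steps : List (List Char)) (cur : List Char),
    cur ≠ [] → pvLoopA ls steps cur = steps ++ pvG cur ls := by
  intro ls
  induction ls with
  | nil => intro steps cur h; simp [pvLoopA, pvG, h]
  | cons l ls ih =>
    intro steps cur h
    by_cases hm : pvIsMarker l = true
    · simp [pvLoopA, pvG, hm, h, ih, pvMarker_ne_nil hm]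
    · simp at hm
      simp [pvLoopA, pvG, hm, h, ih]

-- … and pvC before any group is open
lemma pvLoopA_C : ∀ (ls : List (List Char)) (steps : List (List Char)),
    pvLoopA ls steps [] = steps ++ pvC ls := by
  intro ls
  induction ls with
  | nil => intro steps; simp [pvLoopA, pvC]
  | cons l ls ih =>
    intro steps
    by_cases hm : pvIsMarker l = true
    · simp [pvLoopA, pvC, hm, pvLoopA_G ls steps l (pvMarker_ne_nil hm)]
    · simp at hm; simp [pvLoopA, pvC, hm, ih]

-- joining with ' ' merges the head accumulation of pvG
lemma pvJoin_merge (c l : List Char) (r : List (List Char)) :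
    PySem.Chars.join [' '] (c :: l :: r) = PySem.Chars.join [' '] ((c ++ ' ' :: l) :: r) := by
  cases r with
  | nil => simp [PySem.Chars.join, List.intercalate]
  | cons x r' => simp [PySem.Chars.join, List.intercalate]

-- pvG as a join of the lines up to the next marker
lemma pvG_join : ∀ (ls : List (List Char)) (cur : List Char),
    pvG cur ls =
      PySem.Chars.strip (PySem.Chars.join [' '] (cur :: ls.takeWhile (fun x => !pvIsMarker x)))
        :: pvC ls := by
  intro ls
  induction ls with
  | nil => intro cur; simp [pvG, pvC, PySem.Chars.join, List.intercalate]
  | cons l ls ih =>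
    intro cur
    by_cases hm : pvIsMarker l = true
    · simp [pvG, pvC, hm, List.takeWhile, PySem.Chars.join, List.intercalate]
    · simp at hm
      simp [pvG, pvC, hm, List.takeWhile, ih, pvJoin_merge]

-- nIdxs [] ↔ no marker line
lemma pvNIdxs_nil_iff : ∀ (ls : List (List Char)),
    pvNIdxs ls = [] ↔ ∀ l ∈ ls, pvIsMarker l = false := by
  intro ls
  induction ls with
  | nil => simp [pvNIdxs]
  | cons l ls ih =>
    by_cases hm : pvIsMarker l = true
    · simp [pvNIdxs, hm]
    · simp at hm; simp [pvNIdxs, hm, ih]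

lemma pvC_eq_nil_of_no_marker : ∀ (ls : List (List Char)),
    (∀ l ∈ ls, pvIsMarker l = false) → pvC ls = [] := by
  intro ls
  induction ls with
  | nil => intro _; simp [pvC]
  | cons l ls ih => intro h; simp [pvC, h l (by simp)]; exact ih (fun x hx => h x (by simp [hx]))

-- the first marker index is the length of the marker-free prefix
lemma pvNIdxs_head : ∀ (ls : List (List Char)) (j : Nat) (t : List Nat),
    pvNIdxs ls = j :: t → ls.take j = ls.takeWhile (fun x => !pvIsMarker x) := by
  intro ls
  induction ls with
  | nil => intro j t h; simp [pvNIdxs] at h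
  | cons l ls ih =>
    intro j t h
    by_cases hm : pvIsMarker l = true
    · simp [pvNIdxs, hm] at h
      simp [h.1.symm, List.takeWhile, hm]
    · simp at hm; simp [pvNIdxs, hm] at h
      cases hn : pvNIdxs ls with
      | nil => simp [hn] at h
      | cons j0 t0 =>
        simp [hn] at h
        obtain ⟨hj, _⟩ := h
        simp [← hj, List.takeWhile, hm, List.take_succ_cons, ih j0 t0 hn]

-- the Nat-level slice segments
def pvSegsN (lines : List (List Char)) : List (List Char) :=
  ((pvNIdxs lines).zip ((pvNIdxs lines).drop 1 ++ [lines.length])).map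
    (fun p => PySem.Chars.strip (PySem.Chars.join [' '] ((lines.drop p.1).take (p.2 - p.1))))

-- shifting: a non-marker head shifts every index by one and leaves the segments unchanged
lemma pvPairs_shift (t : List Nat) (l : List Char) (ls : List (List Char)) :
    ((t.map (· + 1)).zip ((t.map (· + 1)).drop 1 ++ [ls.length + 1])).map
        (fun p : Nat × Nat =>
          PySem.Chars.strip (PySem.Chars.join [' '] (((l :: ls).drop p.1).take (p.2 - p.1))))
      = (t.zip (t.drop 1 ++ [ls.length])).map
        (fun p : Nat × Nat =>
          PySem.Chars.strip (PySem.Chars.join [' '] ((ls.drop p.1).take (p.2 - p.1)))) := by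
  have h2 : (t.map (· + 1)).drop 1 ++ [ls.length + 1] = (t.drop 1 ++ [ls.length]).map (· + 1) := by
    simp
  rw [h2, List.zip_map, List.map_map]
  apply List.map_congr_left
  intro p _
  simp [Nat.succ_sub_succ]

lemma pvSegsN_eq_pvC : ∀ (ls : List (List Char)), pvSegsN ls = pvC ls := by
  intro ls
  induction ls with
  | nil => simp [pvSegsN, pvNIdxs, pvC]
  | cons l ls ih =>
    by_cases hm : pvIsMarker l = true
    · cases hn : pvNIdxs ls with
      | nil =>
        have hno : ∀ x ∈ ls, pvIsMarker x = false := (pvNIdxs_nil_iff ls).mp hn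
        have htw : ls.takeWhile (fun x => !pvIsMarker x) = ls :=
          List.takeWhile_eq_self_iff.mpr (by intro x hx; simp [hno x hx])
        simp [pvSegsN, pvNIdxs, hm, hn, pvC, pvG_join, htw,
          pvC_eq_nil_of_no_marker ls hno, List.take_of_length_le]
      | cons j t' =>
        have hhead := pvNIdxs_head ls j t' hn
        have hshift := pvPairs_shift (j :: t') l ls
        simp only [List.map_cons, List.drop_succ_cons, List.drop_zero] at hshift
        have htail : pvSegsN (l :: ls) =
            PySem.Chars.strip (PySem.Chars.join [' ']
              (((l :: ls).drop 0).take (j + 1 - 0))) :: pvSegsN ls := by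
          unfold pvSegsN
          rw [show pvNIdxs (l :: ls) = 0 :: (pvNIdxs ls).map (· + 1) by simp [pvNIdxs, hm]]
          rw [hn]
          simp only [List.map_cons, List.drop_succ_cons, List.drop_zero, List.length_cons,
            List.cons_append, List.zip_cons_cons, List.map_cons]
          exact congrArg _ hshift
        rw [htail, ih]
        have : ((l :: ls).drop 0).take (j + 1 - 0) = l :: ls.take j := by simp [List.take_succ_cons]
        rw [this, hhead]
        simp [pvC, hm, pvG_join]
    · simp at hm
      have : pvSegsN (l :: ls) = pvSegsN ls := by
        unfold pvSegsN
        rw [show pvNIdxs (l :: ls) = (pvNIdxs ls).map (· + 1) by simp [pvNIdxs, hm]]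
        simpa using pvPairs_shift (pvNIdxs ls) l ls
      rw [this, ih]
      simp [pvC, hm]

-- the Int-level indices of port B are the Nat-level ones, cast
lemma pvIdxs_eq : ∀ (ls : List (List Char)) (s : Int),
    ((PySem.List.enumerate ls s).filter (fun p => pvIsMarker p.2)).map (fun p => p.1)
      = (pvNIdxs ls).map (fun n : Nat => (n : Int) + s) := by
  intro ls
  induction ls with
  | nil => intro s; simp [PySem.List.enumerate, pvNIdxs]
  | cons l ls ih =>
    intro s
    have step : ((PySem.List.enumerate ls (s + 1)).filter (fun p => pvIsMarker p.2)).map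
          (fun p => p.1) = ((pvNIdxs ls).map (· + 1)).map (fun n : Nat => (n : Int) + s) := by
      rw [ih (s + 1), List.map_map]
      apply List.map_congr_left
      intro n _
      simp
      ring
    rw [PySem.List.enumerate_cons]
    by_cases hm : pvIsMarker l = true
    · rw [show pvNIdxs (l :: ls) = 0 :: (pvNIdxs ls).map (· + 1) from by simp [pvNIdxs, hm]]
      simp only [List.filter_cons, hm, List.map_cons]
      rw [if_pos trivial, List.map_cons, step, List.map_map]
      simp
    · simp at hm
      rw [show pvNIdxs (l :: ls) = (pvNIdxs ls).map (· + 1) from by simp [pvNIdxs, hm]]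
      simp only [List.filter_cons, hm]
      rw [if_neg (by simp), step, List.map_map]

lemma pvB_eq_segsN (lines : List (List Char)) :
    ((pvIdxs lines).zip ((pvIdxs lines).drop 1 ++ [(lines.length : Int)])).map (pvSeg lines)
      = pvSegsN lines := by
  have hidx : pvIdxs lines = (pvNIdxs lines).map (fun n : Nat => (n : Int)) := by
    unfold pvIdxs
    rw [pvIdxs_eq lines 0]
    simp
  have h2 : ((pvNIdxs lines).map (fun n : Nat => (n : Int))).drop 1 ++ [(lines.length : Int)]
      = ((pvNIdxs lines).drop 1 ++ [lines.length]).map (fun n : Nat => (n : Int)) := by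
    simp
  rw [hidx, h2, List.zip_map, List.map_map]
  unfold pvSegsN
  apply List.map_congr_left
  intro p _
  simp [pvSeg, PySem.List.slice_natCast]

-- ===== VERDICT (by name: the statement is the Claim_ definition above) =====
theorem extract_reasoning_chain_py_spec : Claim_equal_extract_reasoning_chain_py := by
  intro s _
  unfold Spec_extract_reasoning_chain_py extract_reasoning_chain_py extract_reasoning_chain_py_alt
  simp only [pvLoopA_C, List.nil_append, pvB_eq_segsN, pvSegsN_eq_pvC]
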